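-- pv_equiv track=rewrite | github.com/kevin-nick/python | ejercicios_de_practica.py | EDEva
-- ===== SOURCE A (Python) =====
-- def EDEva(ed):
--     cont = 0
--     EDN = []
--     c = ""
--     for i in ed:
--         if i == " ":
--             cont += 1
--         if cont > 2 and i != " " and i != ",":
--             if i != "#":
--                 c += i
--                 if len(c) == 2:
--                     EDN.append(c)
--                     c = ""
--             else:
--                 EDN.append(i)
--     return EDN
-- ===== SOURCE B (Python) =====
-- def EDEva(ed):
--     # phase 1: substring strictly after the third space, then drop spaces and commas
--     tail, n = "", 3
--     for i, ch in enumerate(ed):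
--         if ch == " ":
--             n -= 1
--             if n == 0:
--                 tail = ed[i + 1:]
--                 break
--     stream = [c for c in tail if c != " " and c != ","]
--     # phase 2: pair consecutive chars; '#' passes through without touching the pending char
--     out, pending = [], None
--     for c in stream:
--         if c == "#":
--             out.append("#")
--         elif pending is None:
--             pending = c
--         else:
--             out.append(pending + c)
--             pending = None
--     return out
-- ===== Notes on version B (the rewrite author's own statement) =====
-- stated objective: simpler
-- what changed: B replaces A's single pass with three state variables (space counter, pair buffer, output maintained together) by a two-phase decomposition: first slice off the substring after the third space and filter out spaces and commas, then a separate pairing pass over that stream using an Option pending-char buffer.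
import Mathlib
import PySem

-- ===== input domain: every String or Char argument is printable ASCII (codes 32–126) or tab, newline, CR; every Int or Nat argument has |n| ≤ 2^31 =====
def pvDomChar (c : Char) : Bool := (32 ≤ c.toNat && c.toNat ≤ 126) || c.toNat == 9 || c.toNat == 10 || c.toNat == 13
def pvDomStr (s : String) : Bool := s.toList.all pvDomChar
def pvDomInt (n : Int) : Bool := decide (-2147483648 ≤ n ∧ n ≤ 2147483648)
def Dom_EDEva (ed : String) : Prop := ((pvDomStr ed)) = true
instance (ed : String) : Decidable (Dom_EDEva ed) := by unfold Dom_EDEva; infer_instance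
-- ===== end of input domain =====

-- B re-decomposes A's single counting pass into: slice after the third space, filter, then pair
-- with an Option buffer (objective: simpler two-phase decomposition; same cost).

-- ===== PORT A =====
-- A's loop body: state (cont, EDN, c); the pair buffer c is kept as List Char.
def pvAStep (s : Int × List String × List Char) (i : Char) : Int × List String × List Char :=
  let cont := if i = ' ' then s.1 + 1 else s.1
  if cont > 2 ∧ i ≠ ' ' ∧ i ≠ ',' then
    if i ≠ '#' then
      let c := s.2.2 ++ [i]
      if c.length = 2 then (cont, s.2.1 ++ [String.mk c], []) else (cont, s.2.1, c)
    else (cont, s.2.1 ++ ["#"], s.2.2)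
  else (cont, s.2.1, s.2.2)

def EDEva (ed : String) : List String :=
  (ed.toList.foldl pvAStep (0, [], [])).2.1

-- ===== PORT B =====
-- phase 1 while-loop: consume chars until the n-th space, return the rest.
def pvAfterSpaces : List Char → Int → List Char
  | [], _ => []
  | ch :: rest, n =>
    if ch = ' ' then
      if n - 1 = 0 then rest else pvAfterSpaces rest (n - 1)
    else pvAfterSpaces rest n

-- phase 2 loop body: state (out, pending).
def pvBStep (s : List String × Option Char) (c : Char) : List String × Option Char :=
  if c = '#' then (s.1 ++ ["#"], s.2)
  else match s.2 with
    | none => (s.1, some c)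
    | some p => (s.1 ++ [String.mk [p, c]], none)

def EDEva_alt (ed : String) : List String :=
  let tail := pvAfterSpaces ed.toList 3
  let stream := tail.filter (fun c => c ≠ ' ' ∧ c ≠ ',')
  (stream.foldl pvBStep ([], none)).1

-- ===== PRECONDITION & SPEC =====
def Spec_EDEva (ed : String) (out : List String) : Prop := out = EDEva_alt ed
instance (ed : String) (out : List String) : Decidable (Spec_EDEva ed out) := by unfold Spec_EDEva; infer_instance

-- ===== CLAIM (what is proved, stated in full; the proofs are below) =====
def Claim_equal_EDEva : Prop := ∀ (ed : String), Dom_EDEva ed → Spec_EDEva ed (EDEva ed)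

-- ===== LEMMAS AND PROOFS =====

-- A's guarded inner body, as a step function on (EDN, c) alone
def pvPairStep (s : List String × List Char) (i : Char) : List String × List Char :=
  if i ≠ '#' then
    let c := s.2 ++ [i]
    if c.length = 2 then (s.1 ++ [String.mk c], []) else (s.1, c)
  else (s.1 ++ ["#"], s.2)

-- the characters A's guarded body actually processes, given the running space count
def pvStreamOf : Int → List Char → List Char
  | _, [] => []
  | cont, i :: t =>
    let cont' := if i = ' ' then cont + 1 else cont
    if cont' > 2 ∧ i ≠ ' ' ∧ i ≠ ',' then i :: pvStreamOf cont' t else pvStreamOf cont' t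

-- A's fold equals the pair-fold of its processed stream
theorem pvA_stream (l : List Char) : ∀ (cont : Int) (out : List String) (c : List Char),
    (l.foldl pvAStep (cont, out, c)).2.1
      = ((pvStreamOf cont l).foldl pvPairStep (out, c)).1 := by
  induction l with
  | nil => intro cont out c; simp [pvStreamOf]
  | cons i t ih =>
    intro cont out c
    rw [List.foldl_cons]
    by_cases h : ((if i = ' ' then cont + 1 else cont) > 2 ∧ i ≠ ' ' ∧ i ≠ ',')
    · have hs : pvStreamOf cont (i :: t)
          = i :: pvStreamOf (if i = ' ' then cont + 1 else cont) t := by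
        simp only [pvStreamOf]; rw [if_pos h]
      have hstep : pvAStep (cont, out, c) i
          = ((if i = ' ' then cont + 1 else cont),
             (pvPairStep (out, c) i).1, (pvPairStep (out, c) i).2) := by
        simp only [pvAStep, pvPairStep]
        rw [if_pos h]
        by_cases hh : i = '#' <;> simp [hh] <;> split <;> simp
      rw [hs, List.foldl_cons, hstep, ih]
    · have hs : pvStreamOf cont (i :: t)
          = pvStreamOf (if i = ' ' then cont + 1 else cont) t := by
        simp only [pvStreamOf]; rw [if_neg h]
      have hstep : pvAStep (cont, out, c) i
          = ((if i = ' ' then cont + 1 else cont), out, c) := by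
        simp only [pvAStep]; rw [if_neg h]
      rw [hs, hstep, ih]

-- once cont is at least 3 the stream is just the filter
theorem pvStream_ge3 (l : List Char) : ∀ (cont : Int), 3 ≤ cont →
    pvStreamOf cont l = l.filter (fun c => c ≠ ' ' ∧ c ≠ ',') := by
  induction l with
  | nil => intro cont _; simp [pvStreamOf]
  | cons i t ih =>
    intro cont hc
    by_cases hs : i = ' '
    · rw [show pvStreamOf cont (i :: t) = pvStreamOf (cont + 1) t from by
        simp [pvStreamOf, hs], ih _ (by omega)]
      simp [hs]
    · by_cases hk : i = ','
      · rw [show pvStreamOf cont (i :: t) = pvStreamOf cont t from by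
          simp [pvStreamOf, hs, hk], ih _ hc]
        simp [hk]
      · rw [show pvStreamOf cont (i :: t) = i :: pvStreamOf cont t from by
          simp [pvStreamOf, hs, hk]; omega, ih _ hc]
        simp [hs, hk]

-- before the third space, the stream is the filter of the suffix after it
theorem pvStream_pre (l : List Char) : ∀ (k : Int), 1 ≤ k → k ≤ 3 →
    pvStreamOf (3 - k) l = (pvAfterSpaces l k).filter (fun c => c ≠ ' ' ∧ c ≠ ',') := by
  induction l with
  | nil => intro k _ _; simp [pvStreamOf, pvAfterSpaces]
  | cons i t ih =>
    intro k h1 h3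
    by_cases hs : i = ' '
    · by_cases hk : k - 1 = 0
      · rw [show pvStreamOf (3 - k) (i :: t) = pvStreamOf 3 t from by
          simp [pvStreamOf, hs]; congr 1; omega,
          pvStream_ge3 t 3 le_rfl,
          show pvAfterSpaces (i :: t) k = t from by simp [pvAfterSpaces, hs, hk]]
      · rw [show pvStreamOf (3 - k) (i :: t) = pvStreamOf (3 - (k - 1)) t from by
          simp [pvStreamOf, hs]; congr 1; omega,
          ih (k - 1) (by omega) (by omega),
          show pvAfterSpaces (i :: t) k = pvAfterSpaces t (k - 1) from by
            simp [pvAfterSpaces, hs, hk]]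
    · rw [show pvStreamOf (3 - k) (i :: t) = pvStreamOf (3 - k) t from by
        simp [pvStreamOf, hs]; omega,
        ih k h1 h3,
        show pvAfterSpaces (i :: t) k = pvAfterSpaces t k from by
          simp [pvAfterSpaces, hs]]

-- the pair-fold with list buffer equals B's fold with Option buffer, under the buffer relation
theorem pvPair_eq (stream : List Char) :
    ∀ (out : List String) (c : List Char) (pending : Option Char),
    (c = [] ∧ pending = none) ∨ (∃ p, c = [p] ∧ pending = some p) →
    (stream.foldl pvPairStep (out, c)).1 = (stream.foldl pvBStep (out, pending)).1 := by
  induction stream with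
  | nil => intro out c pending _; simp
  | cons i t ih =>
    intro out c pending hrel
    rw [List.foldl_cons, List.foldl_cons]
    by_cases hh : i = '#'
    · rw [show pvPairStep (out, c) i = (out ++ ["#"], c) from by simp [pvPairStep, hh],
        show pvBStep (out, pending) i = (out ++ ["#"], pending) from by simp [pvBStep, hh]]
      exact ih _ _ _ hrel
    · rcases hrel with ⟨hc, hp⟩ | ⟨p, hc, hp⟩
      · rw [show pvPairStep (out, c) i = (out, [i]) from by simp [pvPairStep, hh, hc],
          show pvBStep (out, pending) i = (out, some i) from by simp [pvBStep, hh, hp]]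
        exact ih _ _ _ (Or.inr ⟨i, rfl, rfl⟩)
      · rw [show pvPairStep (out, c) i = (out ++ [String.mk [p, i]], []) from by
          simp [pvPairStep, hh, hc],
          show pvBStep (out, pending) i = (out ++ [String.mk [p, i]], none) from by
            simp [pvBStep, hh, hp]]
        exact ih _ _ _ (Or.inl ⟨rfl, rfl⟩)

-- ===== VERDICT (by name: the statement is the Claim_ definition above) =====
theorem EDEva_spec : Claim_equal_EDEva := by
  intro ed _
  unfold Spec_EDEva EDEva EDEva_alt
  rw [pvA_stream, show (0 : Int) = 3 - 3 from by norm_num,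
    pvStream_pre ed.toList 3 (by norm_num) le_rfl]
  exact pvPair_eq _ [] [] none (Or.inl ⟨rfl, rfl⟩)
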